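-- pv_equiv track=rewrite | github.com/scorchio/pybites | 121/password.py | _is_long_enough_without_repetition
-- ===== SOURCE A (Python) =====
-- MIN_LENGTH = 8
--
-- def _is_long_enough(password):
--     return len(password) >= MIN_LENGTH
--
-- def _is_long_enough_without_repetition(password):
--     if not _is_long_enough(password):
--         return False
--     previous = ''
--     for c in password:
--         if c == previous:
--             return False
--         previous = c
--     return True
-- ===== SOURCE B (Python) =====
-- MIN_LENGTH = 8
--
-- def _is_long_enough_without_repetition(password):
--     if len(password) < MIN_LENGTH:
--         return False
--     return not any(c + c in password for c in set(password))
-- ===== Notes on version B (the rewrite author's own statement) =====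
-- stated objective: alternative
-- what changed: B drops the previous-character state scan entirely: a consecutive repetition exists iff some doubled two-character substring occurs, so B runs a substring-membership test of the doubled character for each distinct character of the password.
import Mathlib
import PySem

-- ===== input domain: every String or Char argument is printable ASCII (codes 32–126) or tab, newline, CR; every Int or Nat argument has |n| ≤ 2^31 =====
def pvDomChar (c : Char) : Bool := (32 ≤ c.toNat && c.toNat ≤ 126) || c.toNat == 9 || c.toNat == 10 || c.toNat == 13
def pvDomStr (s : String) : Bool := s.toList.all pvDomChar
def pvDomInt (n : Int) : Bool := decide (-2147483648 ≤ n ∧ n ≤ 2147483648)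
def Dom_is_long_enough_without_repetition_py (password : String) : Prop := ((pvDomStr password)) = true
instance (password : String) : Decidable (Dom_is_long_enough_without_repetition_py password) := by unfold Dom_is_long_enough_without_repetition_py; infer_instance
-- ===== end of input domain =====

-- B replaces A's previous-character scan by a doubled-substring test: a consecutive
-- repetition exists iff 'c+c' occurs in the password for some distinct character c.

-- ===== PORT A =====
-- the 'for c in password' loop carrying the mutable 'previous' string
def pvALoop : List Char → String → Bool
  | [], _ => true
  | c :: rest, previous =>
      if String.ofList [c] == previous then false else pvALoop rest (String.ofList [c])

def is_long_enough_without_repetition_py (password : String) : Bool :=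
  if ¬ (PySem.Str.len password ≥ 8) then false
  else pvALoop password.toList ""

-- ===== PORT B =====
def is_long_enough_without_repetition_py_alt (password : String) : Bool :=
  if PySem.Str.len password < 8 then false
  else !((PySem.Set.ofList password.toList).any fun c =>
          PySem.Str.isIn (String.ofList [c, c]) password)

-- ===== PRECONDITION & SPEC =====
def Spec_is_long_enough_without_repetition_py (password : String) (out : Bool) : Prop := out = is_long_enough_without_repetition_py_alt password
instance (password : String) (out : Bool) : Decidable (Spec_is_long_enough_without_repetition_py password out) := by unfold Spec_is_long_enough_without_repetition_py; infer_instance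

-- ===== CLAIM (what is proved, stated in full; the proofs are below) =====
def Claim_equal_is_long_enough_without_repetition_py : Prop := ∀ (password : String), Dom_is_long_enough_without_repetition_py password → Spec_is_long_enough_without_repetition_py password (is_long_enough_without_repetition_py password)

-- ===== LEMMAS AND PROOFS =====

-- A's loop, started at 'previous = p', is true iff no adjacent equal pair in p :: cs
theorem pvALoop_eq_chain (cs : List Char) : ∀ (p : Char),
    pvALoop cs (String.ofList [p]) = true ↔ List.IsChain (· ≠ ·) (p :: cs) := by
  induction cs with
  | nil => intro p; simp [pvALoop]
  | cons c rest ih =>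
      intro p
      by_cases h : c = p
      · subst h; simp [pvALoop]
      · have hne : (String.ofList [c] == String.ofList [p]) = false := by
          simp [beq_eq_false_iff_ne, String.ext_iff, h]
        simp [pvALoop, hne, ih c, Ne.symm h]

theorem pvALoop_start (cs : List Char) :
    pvALoop cs "" = true ↔ List.IsChain (· ≠ ·) cs := by
  cases cs with
  | nil => simp [pvALoop]
  | cons c rest =>
      have hne : (String.ofList [c] == ("" : String)) = false := by
        simp [beq_eq_false_iff_ne, String.ext_iff]
      simp [pvALoop, hne, pvALoop_eq_chain rest c]

-- a doubled substring exists iff some adjacent pair is equal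
theorem infix_double_iff_not_chain (cs : List Char) :
    (∃ c, c ∈ cs ∧ [c, c] <:+: cs) ↔ ¬ List.IsChain (· ≠ ·) cs := by
  induction cs with
  | nil => simp
  | cons a t ih =>
      constructor
      · rintro ⟨c, _, hinf⟩
        rw [List.infix_cons_iff] at hinf
        rcases hinf with hpre | hinf
        · rcases List.cons_prefix_cons.mp hpre with ⟨rfl, hpre2⟩
          cases t with
          | nil => simp at hpre2
          | cons b t' =>
              rcases List.cons_prefix_cons.mp hpre2 with ⟨rfl, _⟩
              intro hch
              exact (List.isChain_cons_cons.mp hch).1 rfl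
        · intro hch
          have := ih.mp ⟨c, (hinf.subset (by simp)), hinf⟩
          exact this hch.tail
      · intro hch
        cases t with
        | nil => exact absurd (List.isChain_singleton a) hch
        | cons b t' =>
            rw [List.isChain_cons_cons] at hch
            push Not at hch
            by_cases hab : a = b
            · subst hab
              exact ⟨a, by simp, ⟨[], t', rfl⟩⟩
            · have hnc : ¬ List.IsChain (· ≠ ·) (b :: t') := fun h => hch hab h
              rcases ih.mpr hnc with ⟨c, hm, hinf⟩
              exact ⟨c, by simp [hm], List.infix_cons hinf⟩

-- ===== VERDICT (by name: the statement is the Claim_ definition above) =====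
theorem is_long_enough_without_repetition_py_spec : Claim_equal_is_long_enough_without_repetition_py := by
  intro password _
  unfold Spec_is_long_enough_without_repetition_py is_long_enough_without_repetition_py is_long_enough_without_repetition_py_alt
  by_cases h : PySem.Str.len password ≥ 8
  · rw [if_neg (not_not_intro h), if_neg (Int.not_lt.mpr h)]
    have key : ((PySem.Set.ofList password.toList).any fun c =>
          PySem.Str.isIn (String.ofList [c, c]) password) = true ↔
        ¬ List.IsChain (· ≠ ·) password.toList := by
      rw [← infix_double_iff_not_chain, List.any_eq_true]
      constructor
      · rintro ⟨c, hm, hin⟩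
        refine ⟨c, (PySem.Set.mem_ofList _ _).mp hm, ?_⟩
        have := (PySem.Str.isIn_iff_infix _ _).mp hin
        simpa using this
      · rintro ⟨c, hm, hin⟩
        exact ⟨c, (PySem.Set.mem_ofList _ _).mpr hm,
          (PySem.Str.isIn_iff_infix _ _).mpr (by simpa using hin)⟩
    rw [Bool.eq_iff_iff, pvALoop_start]
    constructor
    · intro hch
      rw [Bool.not_eq_true', Bool.eq_false_iff]
      intro hc; exact key.mp hc hch
    · intro hb
      by_contra hnc
      rw [key.mpr hnc] at hb
      simp at hb
  · rw [if_pos h, if_pos (Int.not_le.mp h)]
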